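-- pv_equiv track=rewrite | github.com/k-walter/Codes | AOC/2020/14.py | parseQuatumMask
-- ===== SOURCE A (Python) =====
-- from typing import List, Tuple, Dict, Generator
--
-- def parseQuatumMask(val: str) -> Tuple[int, int]:
--     ecks, one = 0, 0
--     for cur, ch in enumerate(reversed(val)):
--         if ch == '0':
--             continue
--         elif ch == '1':
--             one |= (1 << cur)
--         elif ch == 'X':
--             ecks |= (1 << cur)
--     return ecks, one
-- ===== SOURCE B (Python) =====
-- from typing import List, Tuple, Dict, Generator
--
-- def parseQuatumMask(val: str) -> Tuple[int, int]:
--     # Divide and conquer: split the string in half, combine positional values.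
--     # go(s) returns (ecks, one, 2**len(s)); combine: left * 2**len(right) + right.
--     def go(s):
--         n = len(s)
--         if n == 0:
--             return (0, 0, 1)
--         if n == 1:
--             return (1 if s == 'X' else 0, 1 if s == '1' else 0, 2)
--         m = n // 2
--         el, ol, wl = go(s[:m])
--         er, orr, wr = go(s[m:])
--         return (el * wr + er, ol * wr + orr, wl * wr)
--     e, o, _ = go(val)
--     return (e, o)
-- ===== Notes on version B (the rewrite author's own statement) =====
-- stated objective: alternative
-- what changed: Replaces the linear reversed-enumerate loop that ORs bits at a running position by a divide-and-conquer recursion that splits the string in half, computes (ecks, one, weight=2**len) for each half, and combines them with left*weight_right + right.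
import Mathlib
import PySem

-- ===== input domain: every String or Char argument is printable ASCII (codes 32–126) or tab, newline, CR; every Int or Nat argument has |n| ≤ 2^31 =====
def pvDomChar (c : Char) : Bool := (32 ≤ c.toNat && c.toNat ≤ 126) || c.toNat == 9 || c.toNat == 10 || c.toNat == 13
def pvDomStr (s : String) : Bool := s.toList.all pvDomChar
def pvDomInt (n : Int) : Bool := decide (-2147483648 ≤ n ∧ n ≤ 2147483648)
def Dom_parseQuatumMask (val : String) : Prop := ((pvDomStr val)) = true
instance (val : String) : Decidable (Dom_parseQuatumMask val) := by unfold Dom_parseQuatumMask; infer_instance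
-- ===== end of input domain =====

-- B replaces A's reversed-enumerate shift-and-OR loop by a divide-and-conquer recursion
-- that splits the mask in half and combines (ecks, one, weight) triples; objective: alternative.

-- ===== PORT A =====
-- state = (cur, ecks, one); the loop runs over reversed(val) with cur the enumerate counter
def pvStepA (st : Nat × Int × Int) (ch : Char) : Nat × Int × Int :=
  if ch = '0' then (st.1 + 1, st.2.1, st.2.2)
  else if ch = '1' then (st.1 + 1, st.2.1, PySem.Int.bor st.2.2 ((1 : Int) <<< st.1))
  else if ch = 'X' then (st.1 + 1, PySem.Int.bor st.2.1 ((1 : Int) <<< st.1), st.2.2)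
  else (st.1 + 1, st.2.1, st.2.2)

def parseQuatumMask (val : String) : Int × Int :=
  let r := val.toList.reverse.foldl pvStepA (0, 0, 0)
  (r.2.1, r.2.2)

-- ===== PORT B =====
-- go(s) of Source B; the Python slices s[:m], s[m:] with 0 ≤ m ≤ len(s) are exactly take/drop
def pvGo (s : List Char) : Int × Int × Int :=
  if h0 : s.length = 0 then (0, 0, 1)
  else if h1 : s.length = 1 then
    ((if s = ['X'] then 1 else 0), (if s = ['1'] then 1 else 0), 2)
  else
    let m := s.length / 2
    let L := pvGo (s.take m)
    let R := pvGo (s.drop m)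
    (L.1 * R.2.2 + R.1, L.2.1 * R.2.2 + R.2.1, L.2.2 * R.2.2)
termination_by s.length
decreasing_by
  · simp [List.length_take]; omega
  · simp [List.length_drop]; omega

def parseQuatumMask_alt (val : String) : Int × Int :=
  let r := pvGo val.toList
  (r.1, r.2.1)

-- ===== PRECONDITION & SPEC =====
def Spec_parseQuatumMask (val : String) (out : Int × Int) : Prop := out = parseQuatumMask_alt val
instance (val : String) (out : Int × Int) : Decidable (Spec_parseQuatumMask val out) := by unfold Spec_parseQuatumMask; infer_instance

-- ===== CLAIM (what is proved, stated in full; the proofs are below) =====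
def Claim_equal_parseQuatumMask : Prop := ∀ (val : String), Dom_parseQuatumMask val → Spec_parseQuatumMask val (parseQuatumMask val)

-- ===== LEMMAS AND PROOFS =====

-- little-endian values of the reversed character list (index 0 = last character)
def pvExLE : List Char → Nat
  | [] => 0
  | c :: t => (if c = 'X' then 1 else 0) + 2 * pvExLE t

def pvOnLE : List Char → Nat
  | [] => 0
  | c :: t => (if c = '1' then 1 else 0) + 2 * pvOnLE t

-- big-endian values, defined on the front of the list
def pvExBE : List Char → Nat
  | [] => 0
  | c :: t => (if c = 'X' then 1 else 0) * 2 ^ t.length + pvExBE t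

def pvOnBE : List Char → Nat
  | [] => 0
  | c :: t => (if c = '1' then 1 else 0) * 2 ^ t.length + pvOnBE t

theorem pv_lor_two_pow (k : Nat) : ∀ a, a < 2^k → a ||| 2^k = a + 2^k := by
  induction k with
  | zero =>
    intro a h
    have ha : a = 0 := by omega
    subst ha; decide
  | succ k ih =>
    intro a h
    have hd : Nat.bit (a % 2 = 1) (a >>> 1) = a := Nat.bit_decide_mod_two_eq_one_shiftRight_one a
    have h2 : 2 ^ (k+1) = Nat.bit false (2^k) := by simp [Nat.bit_val]; ring
    have hlt : a >>> 1 < 2^k := by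
      rw [Nat.shiftRight_one]
      have := Nat.pow_succ 2 k
      omega
    calc a ||| 2^(k+1) = Nat.bit (a % 2 = 1) (a >>> 1) ||| Nat.bit false (2^k) := by rw [hd, h2]
      _ = Nat.bit ((a % 2 = 1) || false) ((a >>> 1) ||| 2^k) := Nat.lor_bit _ _ _ _
      _ = Nat.bit (a % 2 = 1) ((a >>> 1) + 2^k) := by rw [ih _ hlt, Bool.or_false]
      _ = a + 2^(k+1) := by
        simp only [Nat.bit_val, Nat.shiftRight_one] at *
        have := Nat.pow_succ 2 k
        omega

theorem pv_one_shl (k : Nat) : (1 : Int) <<< k = ((2^k : Nat) : Int) := by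
  simp [Int.shiftLeft_eq]

theorem pv_bor_pow (e : Nat) (k : Nat) (h : e < 2^k) :
    PySem.Int.bor ((e : Nat) : Int) ((1 : Int) <<< k) = (((e + 2^k : Nat)) : Int) := by
  rw [pv_one_shl, PySem.Int.bor_natCast, pv_lor_two_pow k e h]

theorem pv_lemA (rl : List Char) : ∀ (k e o : Nat), e < 2^k → o < 2^k →
    rl.foldl pvStepA (k, ((e : Nat) : Int), ((o : Nat) : Int)) =
      (k + rl.length, ((e + 2^k * pvExLE rl : Nat) : Int), ((o + 2^k * pvOnLE rl : Nat) : Int)) := by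
  induction rl with
  | nil => intro k e o he ho; simp [pvExLE, pvOnLE]
  | cons c t ih =>
    intro k e o he ho
    have hp : (2:Nat)^(k+1) = 2 * 2^k := by ring
    by_cases h0 : c = '0'
    · rw [List.foldl_cons]
      rw [show pvStepA (k, ((e:Nat):Int), ((o:Nat):Int)) c = (k+1, ((e:Nat):Int), ((o:Nat):Int)) by
        simp [pvStepA, h0]]
      rw [ih (k+1) e o (by omega) (by omega)]
      have hx : pvExLE (c :: t) = 2 * pvExLE t := by simp [pvExLE, h0]
      have hn : pvOnLE (c :: t) = 2 * pvOnLE t := by simp [pvOnLE, h0]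
      refine Prod.ext (by simp [List.length_cons]; omega) (Prod.ext ?_ ?_) <;>
        simp [hx, hn] <;> push_cast <;> ring
    · by_cases h1 : c = '1'
      · rw [List.foldl_cons]
        rw [show pvStepA (k, ((e:Nat):Int), ((o:Nat):Int)) c
              = (k+1, ((e:Nat):Int), (((o + 2^k : Nat)) : Int)) by
          simp [pvStepA, h1, pv_bor_pow o k ho]]
        rw [ih (k+1) e (o + 2^k) (by omega) (by omega)]
        have hx : pvExLE (c :: t) = 2 * pvExLE t := by simp [pvExLE, h1]
        have hn : pvOnLE (c :: t) = 1 + 2 * pvOnLE t := by simp [pvOnLE, h1]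
        refine Prod.ext (by simp [List.length_cons]; omega) (Prod.ext ?_ ?_) <;>
          simp [hx, hn] <;> push_cast <;> ring
      · by_cases hX : c = 'X'
        · rw [List.foldl_cons]
          rw [show pvStepA (k, ((e:Nat):Int), ((o:Nat):Int)) c
                = (k+1, (((e + 2^k : Nat)) : Int), ((o:Nat):Int)) by
            simp [pvStepA, hX, pv_bor_pow e k he]]
          rw [ih (k+1) (e + 2^k) o (by omega) (by omega)]
          have hx : pvExLE (c :: t) = 1 + 2 * pvExLE t := by simp [pvExLE, hX]
          have hn : pvOnLE (c :: t) = 2 * pvOnLE t := by simp [pvOnLE, hX]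
          refine Prod.ext (by simp [List.length_cons]; omega) (Prod.ext ?_ ?_) <;>
            simp [hx, hn] <;> push_cast <;> ring
        · rw [List.foldl_cons]
          rw [show pvStepA (k, ((e:Nat):Int), ((o:Nat):Int)) c = (k+1, ((e:Nat):Int), ((o:Nat):Int)) by
            simp [pvStepA, h0, h1, hX]]
          rw [ih (k+1) e o (by omega) (by omega)]
          have hx : pvExLE (c :: t) = 2 * pvExLE t := by simp [pvExLE, hX]
          have hn : pvOnLE (c :: t) = 2 * pvOnLE t := by simp [pvOnLE, h1]
          refine Prod.ext (by simp [List.length_cons]; omega) (Prod.ext ?_ ?_) <;>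
            simp [hx, hn] <;> push_cast <;> ring

-- big-endian value of l equals little-endian value of its reverse
theorem pv_BE_rev (l : List Char) :
    pvExBE l = pvExLE l.reverse ∧ pvOnBE l = pvOnLE l.reverse := by
  induction l with
  | nil => simp [pvExBE, pvOnBE, pvExLE, pvOnLE]
  | cons c t ih =>
    have hx : ∀ (m : List Char) (b : Nat), pvExLE (m ++ [c]) = pvExLE m + (if c = 'X' then 1 else 0) * 2 ^ m.length ∧
        pvOnLE (m ++ [c]) = pvOnLE m + (if c = '1' then 1 else 0) * 2 ^ m.length := by
      intro m _
      induction m with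
      | nil => simp [pvExLE, pvOnLE]
      | cons d u ihu =>
        simp only [List.cons_append, pvExLE, pvOnLE, List.length_cons, ihu.1, ihu.2]
        constructor <;> ring
    have h := hx t.reverse 0
    simp only [pvExBE, pvOnBE, List.reverse_cons, ih.1, ih.2, h.1, h.2, List.length_reverse]
    omega

-- big-endian splits over append
theorem pv_BE_append (l1 l2 : List Char) :
    pvExBE (l1 ++ l2) = pvExBE l1 * 2 ^ l2.length + pvExBE l2 ∧
    pvOnBE (l1 ++ l2) = pvOnBE l1 * 2 ^ l2.length + pvOnBE l2 := by
  induction l1 with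
  | nil => simp [pvExBE, pvOnBE]
  | cons c t ih =>
    simp only [List.cons_append, pvExBE, pvOnBE, ih.1, ih.2, List.length_append]
    constructor <;> · rw [pow_add]; ring

theorem pvGo_eq (s : List Char) :
    pvGo s = (((pvExBE s : Nat) : Int), ((pvOnBE s : Nat) : Int), ((2 ^ s.length : Nat) : Int)) := by
  induction s using pvGo.induct with
  | case1 s h0 =>
    have : s = [] := List.eq_nil_of_length_eq_zero h0
    subst this; simp [pvGo, pvExBE, pvOnBE]
  | case2 s h0 h1 =>
    obtain ⟨c, hc⟩ := List.length_eq_one_iff.mp h1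
    subst hc
    rw [pvGo, dif_neg (by simp), dif_pos (by simp)]
    simp only [pvExBE, pvOnBE, List.length_nil, pow_zero, mul_one, List.length_cons, pow_one]
    by_cases hX : c = 'X' <;> by_cases h1' : c = '1' <;>
      simp_all [List.cons.injEq]
  | case3 s h0 h1 m ihL ihR =>
    have hm : m = s.length / 2 := rfl
    simp only [hm] at ihL ihR
    rw [pvGo, dif_neg h0, dif_neg h1]
    simp only [ihL, ihR]
    have hsplit := pv_BE_append (s.take (s.length / 2)) (s.drop (s.length / 2))
    rw [List.take_append_drop] at hsplit
    have hlen : (List.take (s.length / 2) s).length + (List.drop (s.length / 2) s).length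
        = s.length := by
      simp [List.length_take, List.length_drop]; omega
    rw [hsplit.1, hsplit.2]
    refine Prod.ext ?_ (Prod.ext ?_ ?_)
    · push_cast; ring
    · push_cast; ring
    · push_cast
      rw [← pow_add, hlen]

-- ===== VERDICT (by name: the statement is the Claim_ definition above) =====
theorem parseQuatumMask_spec : Claim_equal_parseQuatumMask := by
  intro val _
  unfold Spec_parseQuatumMask parseQuatumMask parseQuatumMask_alt
  have hA := pv_lemA val.toList.reverse 0 0 0 (by norm_num) (by norm_num)
  simp only [Nat.cast_zero] at hA
  rw [hA, pvGo_eq]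
  have h := pv_BE_rev val.toList
  simp [h.1, h.2]
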